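-- pv_equiv track=rewrite | github.com/RazinAleksandr/comfyui-agent | LightX2V/lightx2v/models/runners/seedvr/seedvr_runner.py | _build_sr_segments
-- ===== SOURCE A (Python) =====
-- def _build_sr_segments(total_frames, seg_len, overlap):
--     if total_frames <= seg_len:
--         return [(0, total_frames)]
--     step = max(seg_len - overlap, 1)
--     segments = []
--     start = 0
--     while start < total_frames:
--         end = min(start + seg_len, total_frames)
--         segments.append((start, end))
--         if end >= total_frames:
--             break
--         start = end - overlap
--         if start < 0:
--             start = 0
--     return segments
-- ===== SOURCE B (Python) =====
-- def _build_sr_segments(total_frames, seg_len, overlap):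
--     if total_frames <= seg_len:
--         return [(0, total_frames)]
--     if total_frames <= 0:
--         return []
--     step = max(seg_len - overlap, 1)
--     n = -(-(total_frames - seg_len) // step) + 1
--     return [(i * step, min(i * step + seg_len, total_frames)) for i in range(n)]
-- ===== Notes on version B (the rewrite author's own statement) =====
-- stated objective: simpler
-- what changed: Replaces A's stateful break-driven while loop with a closed-form segment count (ceiling division) and a single range comprehension; Pre_ excludes the inputs where A's loop never terminates (overlap >= seg_len with seg_len < total_frames, 0 < total_frames) and the unspecified negative-overlap corner where the step jumps past total_frames, on which A silently drops trailing frames while B emits its uniform final clamped segment.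
-- outside the precondition, e.g. on _build_sr_segments(10, 4, -7): A returns [(0, 4)], B returns [(0, 4), (11, 10)]
import Mathlib
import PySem

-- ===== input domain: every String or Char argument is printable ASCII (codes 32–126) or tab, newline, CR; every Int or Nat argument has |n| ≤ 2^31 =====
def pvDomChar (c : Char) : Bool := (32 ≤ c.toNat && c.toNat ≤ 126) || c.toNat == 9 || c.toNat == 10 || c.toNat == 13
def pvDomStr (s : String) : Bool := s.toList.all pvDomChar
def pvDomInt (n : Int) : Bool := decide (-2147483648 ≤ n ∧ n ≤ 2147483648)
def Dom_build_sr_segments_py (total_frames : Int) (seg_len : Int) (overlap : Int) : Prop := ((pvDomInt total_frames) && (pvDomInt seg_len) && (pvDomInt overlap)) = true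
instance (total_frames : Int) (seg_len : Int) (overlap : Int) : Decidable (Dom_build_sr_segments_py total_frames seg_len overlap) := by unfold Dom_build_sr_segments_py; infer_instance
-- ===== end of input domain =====

-- B replaces A's break-driven while loop by a closed-form segment count plus a single
-- range comprehension (objective: simpler decomposition, same cost).

-- ===== PORT A =====
-- literal port of A's while loop; fuel is only a termination device: under
-- Pre_ the loop exits before the fuel (total_frames.toNat + 1) runs out.
def buildLoopA (total_frames seg_len overlap : Int) : Nat → Int → List (Int × Int) → List (Int × Int)
  | 0, _, segments => segments.reverse
  | fuel + 1, start, segments =>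
    if start < total_frames then
      let «end» := min (start + seg_len) total_frames
      let segments' := (start, «end») :: segments
      if «end» ≥ total_frames then segments'.reverse
      else
        let start' := «end» - overlap
        buildLoopA total_frames seg_len overlap fuel (if start' < 0 then 0 else start') segments'
    else segments.reverse

def build_sr_segments_py (total_frames : Int) (seg_len : Int) (overlap : Int) : List (Int × Int) :=
  if total_frames ≤ seg_len then [(0, total_frames)]
  else
    let _step := max (seg_len - overlap) 1   -- dead in A too
    buildLoopA total_frames seg_len overlap (total_frames.toNat + 1) 0 []

-- ===== PORT B =====
def build_sr_segments_py_alt (total_frames : Int) (seg_len : Int) (overlap : Int) : List (Int × Int) :=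
  if total_frames ≤ seg_len then [(0, total_frames)]
  else if total_frames ≤ 0 then []
  else
    let step := max (seg_len - overlap) 1
    let n := -(PySem.Int.floordiv (-(total_frames - seg_len)) step) + 1
    (PySem.List.pyRange 0 n 1).map (fun i => (i * step, min (i * step + seg_len) total_frames))

-- ===== PRECONDITION & SPEC =====
-- Pre_ excludes (a) the inputs where A's while loop never terminates (overlap ≥ seg_len with
-- seg_len < total_frames < ∞ and 0 < total_frames: A diverges, returning nothing), and
-- (b) the unspecified negative-overlap corner where the step jumps past total_frames
-- (first multiple of seg_len - overlap at or beyond total_frames - seg_len is still ≥ total_frames):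
-- there A silently drops trailing frames while B emits its uniform final clamped segment —
-- neither value is specified for such an input.
def Pre_build_sr_segments_py (total_frames : Int) (seg_len : Int) (overlap : Int) : Prop :=
  total_frames ≤ seg_len ∨ total_frames ≤ 0 ∨
    (overlap < seg_len ∧ PySem.Int.mod (seg_len - total_frames) (seg_len - overlap) < seg_len)
instance (total_frames : Int) (seg_len : Int) (overlap : Int) : Decidable (Pre_build_sr_segments_py total_frames seg_len overlap) := by unfold Pre_build_sr_segments_py; infer_instance

def pvWitness_build_sr_segments_py : Int × Int × Int := (10, 4, 1)

def Spec_build_sr_segments_py (total_frames : Int) (seg_len : Int) (overlap : Int) (out : List (Int × Int)) : Prop := out = build_sr_segments_py_alt total_frames seg_len overlap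
instance (total_frames : Int) (seg_len : Int) (overlap : Int) (out : List (Int × Int)) : Decidable (Spec_build_sr_segments_py total_frames seg_len overlap out) := by unfold Spec_build_sr_segments_py; infer_instance

-- ===== CLAIM (what is proved, stated in full; the proofs are below) =====
def Claim_equal_build_sr_segments_py : Prop := ∀ (total_frames : Int) (seg_len : Int) (overlap : Int), Dom_build_sr_segments_py total_frames seg_len overlap → Pre_build_sr_segments_py total_frames seg_len overlap → Spec_build_sr_segments_py total_frames seg_len overlap (build_sr_segments_py total_frames seg_len overlap)

-- ===== LEMMAS AND PROOFS =====

-- A's loop at start = i*s (s = seg_len - overlap > 0) emits exactly the closed-form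
-- segments for indices i, i+1, …, min(k1+1, k2) - 1, where k1 = ⌈(T-L)/s⌉, k2 = ⌈T/s⌉.
theorem loopA_eq_closed (T L ov : Int) (hov : ov < L) (hTL : L < T) :
    ∀ (fuel : Nat) (i : Int) (acc : List (Int × Int)),
      0 ≤ i → T - i * (L - ov) < (fuel : Int) →
      (i = 0 ∨ (i - 1) * (L - ov) + L < T) →
      buildLoopA T L ov fuel (i * (L - ov)) acc
        = acc.reverse ++
          (PySem.List.pyRange i
              (min (-(PySem.Int.floordiv (-(T - L)) (L - ov)) + 1)
                   (-(PySem.Int.floordiv (-T) (L - ov)))) 1).map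
            (fun j => (j * (L - ov), min (j * (L - ov) + L) T)) := by
  have hs : (0:Int) < L - ov := by omega
  set s := L - ov with hsdef
  set k1 := -(PySem.Int.floordiv (-(T - L)) s) with hk1def
  set k2 := -(PySem.Int.floordiv (-T) s) with hk2def
  have hk1 : (k1 - 1) * s < T - L ∧ T - L ≤ k1 * s :=
    (PySem.Int.neg_floordiv_neg_eq_iff_of_pos (a := T - L) (b := s) (q := k1) hs).mp rfl
  have hk2 : (k2 - 1) * s < T ∧ T ≤ k2 * s :=
    (PySem.Int.neg_floordiv_neg_eq_iff_of_pos (a := T) (b := s) (q := k2) hs).mp rfl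
  -- if the loop would stop (start ≥ T), the remaining range is empty
  have hstop : ∀ i : Int, T ≤ i * s → min (k1 + 1) k2 ≤ i := by
    intro i hT
    have : k2 ≤ i := by
      by_contra h
      have hle : i ≤ k2 - 1 := by omega
      have := mul_le_mul_of_nonneg_right hle hs.le
      omega
    omega
  intro fuel
  induction fuel with
  | zero =>
    intro i acc _ hfuel _
    have : T ≤ i * s := by push_cast at hfuel; omega
    rw [PySem.List.pyRange_one_eq_nil (hstop i this)]
    simp [buildLoopA]
  | succ f ih =>
    intro i acc hi hfuel hinv
    rw [buildLoopA]
    by_cases hlt : i * s < T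
    · rw [if_pos hlt]
      have hik2 : i < k2 := by
        by_contra h
        have := mul_le_mul_of_nonneg_right (show k2 ≤ i by omega) hs.le
        omega
      by_cases hbr : i * s + L ≥ T
      · -- break: this is the last segment, n = i + 1
        have hmin : min (i * s + L) T = T := by omega
        rw [if_pos (by omega : min (i * s + L) T ≥ T)]
        have hik1 : k1 ≤ i := by
          by_contra h
          have := mul_le_mul_of_nonneg_right (show i ≤ k1 - 1 by omega) hs.le
          omega
        have hik1' : i ≤ k1 := by
          rcases hinv with h0 | hprev
          · subst h0; simp at hlt hbr; omega
          · by_contra h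
            have := mul_le_mul_of_nonneg_right (show k1 ≤ i - 1 by omega) hs.le
            omega
        have hn : min (k1 + 1) k2 = i + 1 := by omega
        rw [hn, PySem.List.pyRange_one_cons (by omega : i < i + 1),
            PySem.List.pyRange_one_eq_nil (le_refl (i + 1))]
        simp [hmin]
      · -- continue: start advances to (i+1)*s
        push Not at hbr
        have hmin : min (i * s + L) T = i * s + L := by omega
        rw [if_neg (by omega : ¬ min (i * s + L) T ≥ T)]
        have hs2 : min (i * s + L) T - ov = (i + 1) * s := by rw [hmin]; ring_nf; omega
        have hpos : ¬ ((i + 1) * s < 0) := by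
          have := mul_le_mul_of_nonneg_right (show (1:Int) ≤ i + 1 by omega) hs.le
          omega
        rw [hs2]
        show buildLoopA T L ov f (if (i + 1) * s < 0 then 0 else (i + 1) * s)
            ((i * s, min (i * s + L) T) :: acc) = _
        rw [if_neg hpos]
        have hik1 : i < k1 := by
          by_contra h
          have := mul_le_mul_of_nonneg_right (show k1 ≤ i by omega) hs.le
          omega
        rw [ih (i + 1) ((i * s, min (i * s + L) T) :: acc) (by omega)
              (by push_cast at hfuel ⊢; nlinarith) (Or.inr (by ring_nf; omega))]
        rw [PySem.List.pyRange_one_cons (by omega : i < min (k1 + 1) k2)]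
        simp [hmin]
    · rw [if_neg hlt]
      rw [PySem.List.pyRange_one_eq_nil (hstop i (by omega))]
      simp

-- ===== VERDICT (by name: the statement is the Claim_ definition above) =====
theorem build_sr_segments_py_spec : Claim_equal_build_sr_segments_py := by
  intro T L ov _ hpre
  unfold Spec_build_sr_segments_py build_sr_segments_py build_sr_segments_py_alt
  by_cases h : T ≤ L
  · simp [h]
  · rw [if_neg h, if_neg h]
    by_cases hT0 : T ≤ 0
    · rw [if_pos hT0]
      simp [buildLoopA, show ¬ (0 < T) by omega]
    rw [if_neg hT0]
    obtain ⟨hov, hmod⟩ : ov < L ∧ PySem.Int.mod (L - T) (L - ov) < L := by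
      rcases hpre with h' | h' | h'
      · omega
      · omega
      · exact h'
    have hs : (0:Int) < L - ov := by omega
    set s := L - ov with hsdef
    have hstep : max s 1 = s := by omega
    have hfd : PySem.Int.floordiv (-(T - L)) s = PySem.Int.floordiv (L - T) s := by
      norm_num
    set k1 := -(PySem.Int.floordiv (-(T - L)) s) with hk1def
    set k2 := -(PySem.Int.floordiv (-T) s) with hk2def
    have hk2' : (k2 - 1) * s < T ∧ T ≤ k2 * s :=
      (PySem.Int.neg_floordiv_neg_eq_iff_of_pos (a := T) (b := s) (q := k2) hs).mp rfl
    have hmm := PySem.Int.floordiv_mul_add_mod (L - T) s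
    have hk1T : k1 * s < T := by
      have : PySem.Int.floordiv (L - T) s * s + PySem.Int.mod (L - T) s = L - T := hmm
      have hk1e : k1 = -(PySem.Int.floordiv (L - T) s) := by rw [hk1def, hfd]
      nlinarith [hmod, this, hk1e]
    have hmin : min (k1 + 1) k2 = k1 + 1 := by
      have : k1 < k2 := by
        by_contra hc
        have := mul_le_mul_of_nonneg_right (show k2 ≤ k1 by omega) hs.le
        omega
      omega
    have := loopA_eq_closed T L ov hov (by omega) (T.toNat + 1) 0 []
      (le_refl 0) (by have := Int.self_le_toNat T; push_cast; omega) (Or.inl rfl)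
    simp only [zero_mul, List.reverse_nil, List.nil_append] at this
    rw [← hsdef, ← hk1def, ← hk2def] at this
    simp only [hstep]
    rw [this, hmin]
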